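-- pv_equiv track=rewrite | github.com/kypello/Scummpiler | Tools/JestarJokin/scummbler_py2/src/scummbler_misc.py | escape_string_legacy
-- ===== SOURCE A (Python) =====
-- import string
--
-- def escape_string_legacy(in_str):
--     """# descumm uses the karat char ("^") to escape characters.
--     # Unfortunately, SCUMM scripts use the "^" char to represent three ellipses...
--     #  and descumm does not escape it!
--     # So, I've tried to work around it with this parse action.
--     # NOTE: this means strings will NOT WORK if they have an escape character followed
--     #  by a digit! We can make it work for 3-digit escape codes, but any less and
--     #  we don't know where the escape code ends and the digit in the text begins.
--     #  Actually, descumm only outputs escape codes if (i <= 31 && i >= 128), so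
--     #  we could check if:
--     #  code is > 1000 (one too many digits)
--     #  code is > 31 and < 128 (not output by descumm, so assume it's invalid)
--     """
--     esc = False
--     esc_val = ""
--     out_string = ""
--     for c in in_str:
--         if esc: # we're currently escaping
--             if c in string.digits: # digit following ^
--                 esc_val += c
--                 continue
--             else: # not a digit following ^, either stop escaping or print "^"
--                 esc = False
--                 if esc_val == "": # no digits following "^", assume it's the karat char
--                     out_string += "^"
--                 elif int(esc_val) > 255 or int(esc_val) < 0: #or \
--                     #(int(esc_val) > 31 and int(esc_val) < 128): # check if escape code is valid
--                     raise ScummblerException("Invalid escape character code: ^" + esc_val)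
--                 else: # add escape code to output string
--                     out_string += chr(int(esc_val))
--
--         if c == "^": # start escaping
--             esc = True
--             esc_val = ""
--         else: # not escaping at all, just add the char
--             out_string += c
--     return out_string
--
-- class ScummblerException(Exception):
--     pass
-- ===== SOURCE B (Python) =====
-- import string
--
-- class ScummblerException(Exception):
--     pass
--
-- def escape_string_legacy(in_str):
--     out = []
--     i = 0
--     n = len(in_str)
--     while i < n:
--         c = in_str[i]
--         if c == "^":
--             j = i + 1
--             while j < n and in_str[j] in string.digits:
--                 j += 1
--             if j == n:  # escape run reaches end of string: never flushed
--                 break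
--             esc_val = in_str[i + 1:j]
--             if esc_val == "":
--                 out.append("^")
--             elif int(esc_val) > 255:
--                 raise ScummblerException("Invalid escape character code: ^" + esc_val)
--             else:
--                 out.append(chr(int(esc_val)))
--             i = j  # the terminating non-digit is reprocessed normally
--         else:
--             out.append(c)
--             i += 1
--     return "".join(out)
-- ===== Notes on version B (the rewrite author's own statement) =====
-- stated objective: alternative
-- what changed: Replaces the carried esc/esc_val flag state machine by an index-based outer loop with an inner digit scan that consumes each ^-escape run in one step and reprocesses the terminator.
import Mathlib
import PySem

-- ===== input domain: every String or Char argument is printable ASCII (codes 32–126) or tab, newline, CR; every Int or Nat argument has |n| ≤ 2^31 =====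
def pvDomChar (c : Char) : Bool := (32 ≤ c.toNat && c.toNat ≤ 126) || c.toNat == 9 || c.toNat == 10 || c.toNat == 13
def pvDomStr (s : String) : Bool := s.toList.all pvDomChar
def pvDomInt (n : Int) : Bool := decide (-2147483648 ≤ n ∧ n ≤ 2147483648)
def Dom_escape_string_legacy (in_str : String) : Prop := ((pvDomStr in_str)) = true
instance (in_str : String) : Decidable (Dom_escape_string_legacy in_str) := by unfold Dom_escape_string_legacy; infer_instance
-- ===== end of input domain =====

-- B replaces A's carried esc/esc_val flag state machine by an index-based loop with an
-- inner digit scan per ^-escape (objective: alternative decomposition, same cost).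

-- `c in string.digits` (exact: ASCII '0'..'9')
def pvIsDigit (c : Char) : Bool := 48 ≤ c.toNat && c.toNat ≤ 57
-- int(esc_val) for a digit-only string, as Python computes it
def pvVal (l : List Char) : Int := l.foldl (fun a c => a * 10 + ((c.toNat : Int) - 48)) 0

-- ===== PORT A =====
-- state: esc flag, esc_val, out_string; returns none where the Python raises
def pvAuxA : List Char → Bool → List Char → List Char → Option (List Char)
  | [], _, _, out => some out
  | c :: rest, esc, ev, out =>
    if esc then
      if pvIsDigit c then pvAuxA rest true (ev ++ [c]) out
      else
        -- flush the escape, then fall through to the shared `if c == "^"` (duplicated per branch)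
        if ev = [] then
          if c = '^' then pvAuxA rest true [] (out ++ ['^'])
          else pvAuxA rest false ev (out ++ ['^'] ++ [c])
        else if pvVal ev > 255 ∨ pvVal ev < 0 then none  -- raise ScummblerException
        else
          if c = '^' then pvAuxA rest true [] (out ++ [Char.ofNat (pvVal ev).toNat])
          else pvAuxA rest false ev (out ++ [Char.ofNat (pvVal ev).toNat] ++ [c])
    else
      if c = '^' then pvAuxA rest true [] out
      else pvAuxA rest false ev (out ++ [c])

def escape_string_legacy (in_str : String) : String :=
  String.ofList ((pvAuxA in_str.toList false [] []).getD [])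

-- ===== PORT B =====
-- index loop rendered as recursion on the remaining characters; the inner
-- `while j < n and in_str[j] in string.digits` is takeWhile/drop on the tail
def pvAuxB : List Char → Option (List Char)
  | [] => some []
  | c :: rest =>
    if c = '^' then
      let ev := rest.takeWhile pvIsDigit
      let rest' := rest.drop ev.length
      if rest' = [] then some []  -- break: trailing escape never flushed
      else if ev = [] then (pvAuxB rest').map (fun r => '^' :: r)
      else if pvVal ev > 255 then none  -- raise ScummblerException
      else (pvAuxB rest').map (fun r => Char.ofNat (pvVal ev).toNat :: r)
    else (pvAuxB rest).map (fun r => c :: r)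
termination_by l => l.length
decreasing_by
  all_goals simp_all
  all_goals omega

def escape_string_legacy_alt (in_str : String) : String :=
  String.ofList ((pvAuxB in_str.toList).getD [])

-- ===== PRECONDITION & SPEC =====
-- Pre_ excludes exactly the inputs where A raises ScummblerException: a '^' whose
-- following maximal digit run is terminated by a non-digit and has value > 255.
def Pre_escape_string_legacy (in_str : String) : Prop :=
  ∀ i, i < in_str.toList.length → in_str.toList[i]? = some '^' →
    (((in_str.toList.drop (i + 1)).takeWhile pvIsDigit).length
        < (in_str.toList.drop (i + 1)).length →
      pvVal ((in_str.toList.drop (i + 1)).takeWhile pvIsDigit) ≤ 255)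
instance (in_str : String) : Decidable (Pre_escape_string_legacy in_str) := by
  unfold Pre_escape_string_legacy; infer_instance

def pvWitness_escape_string_legacy : String := "a^65b^^c"

def Spec_escape_string_legacy (in_str : String) (out : String) : Prop := out = escape_string_legacy_alt in_str
instance (in_str : String) (out : String) : Decidable (Spec_escape_string_legacy in_str out) := by unfold Spec_escape_string_legacy; infer_instance

-- ===== CLAIM (what is proved, stated in full; the proofs are below) =====
def Claim_equal_escape_string_legacy : Prop := ∀ (in_str : String), Dom_escape_string_legacy in_str → Pre_escape_string_legacy in_str → Spec_escape_string_legacy in_str (escape_string_legacy in_str)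

-- ===== LEMMAS AND PROOFS =====

-- what A's esc=true state computes, phrased over B's building blocks
def pvFlush (ev : List Char) : Option (List Char) :=
  if ev = [] then some ['^']
  else if pvVal ev > 255 ∨ pvVal ev < 0 then none
  else some [Char.ofNat (pvVal ev).toNat]

def pvAuxBEsc (ev l : List Char) : Option (List Char) :=
  if l.dropWhile pvIsDigit = [] then some []
  else (pvFlush (ev ++ l.takeWhile pvIsDigit)).bind
        (fun f => (pvAuxB (l.dropWhile pvIsDigit)).map (fun r => f ++ r))

theorem pvVal_nonneg : ∀ (l : List Char), (∀ c ∈ l, pvIsDigit c) → 0 ≤ pvVal l := by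
  have key : ∀ (l : List Char) (a : Int), 0 ≤ a → (∀ c ∈ l, pvIsDigit c) →
      0 ≤ l.foldl (fun a c => a * 10 + ((c.toNat : Int) - 48)) a := by
    intro l
    induction l with
    | nil => intro a ha _; simpa using ha
    | cons c rest ih =>
      intro a ha h
      have hc : pvIsDigit c := h c (by simp)
      have hc' : 48 ≤ (c.toNat : Int) := by
        simp [pvIsDigit] at hc
        omega
      simp only [List.foldl_cons]
      exact ih _ (by nlinarith) (fun d hd => h d (by simp [hd]))
  intro l h; exact key l 0 le_rfl h

theorem pvDropTake (rest : List Char) :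
    rest.drop (rest.takeWhile pvIsDigit).length = rest.dropWhile pvIsDigit := by
  induction rest with
  | nil => simp
  | cons c t ih =>
    by_cases h : pvIsDigit c <;>
      simp [List.takeWhile_cons, List.dropWhile_cons, h, ih]

theorem pvAuxB_karat (rest : List Char) :
    pvAuxB ('^' :: rest) = pvAuxBEsc [] rest := by
  have hnn : 0 ≤ pvVal (rest.takeWhile pvIsDigit) :=
    pvVal_nonneg _ (fun c hc => List.mem_takeWhile_imp hc)
  by_cases h1 : rest.dropWhile pvIsDigit = []
  · simp [pvAuxB, pvAuxBEsc, pvDropTake, h1]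
  · by_cases h2 : rest.takeWhile pvIsDigit = []
    · have hr : rest.dropWhile pvIsDigit = rest := by
        cases rest with
        | nil => simp
        | cons a t =>
          by_cases ha : pvIsDigit a
          · simp [List.takeWhile_cons, ha] at h2
          · simp [List.dropWhile_cons, ha]
      have hne : rest ≠ [] := by intro h; rw [h] at h1; simp at h1
      simp [pvAuxB, pvAuxBEsc, pvFlush, pvDropTake, h1, h2, hr, hne, Option.map_eq_bind]
    · by_cases h3 : pvVal (rest.takeWhile pvIsDigit) > 255
      · simp [pvAuxB, pvAuxBEsc, pvFlush, pvDropTake, h1, h2, h3]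
      · have h6 : ¬ pvVal (rest.takeWhile pvIsDigit) < 0 := by omega
        simp [pvAuxB, pvAuxBEsc, pvFlush, pvDropTake, h1, h2, h3, h6]

-- one-step unfoldings of A's loop body
theorem stepA_false_karat (rest ev out) :
    pvAuxA ('^' :: rest) false ev out = pvAuxA rest true [] out := by
  simp [pvAuxA]

theorem stepA_false_other (c : Char) (rest ev out) (hc : c ≠ '^') :
    pvAuxA (c :: rest) false ev out = pvAuxA rest false ev (out ++ [c]) := by
  simp [pvAuxA, hc]

theorem stepA_true_digit (c : Char) (rest ev out) (hd : pvIsDigit c) :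
    pvAuxA (c :: rest) true ev out = pvAuxA rest true (ev ++ [c]) out := by
  simp [pvAuxA, hd]

theorem stepA_true_empty_karat (rest out) :
    pvAuxA ('^' :: rest) true [] out = pvAuxA rest true [] (out ++ ['^']) := by
  simp [pvAuxA, pvIsDigit]

theorem stepA_true_empty_other (c : Char) (rest out) (hd : ¬ pvIsDigit c) (hc : c ≠ '^') :
    pvAuxA (c :: rest) true [] out = pvAuxA rest false [] (out ++ ['^'] ++ [c]) := by
  simp [pvAuxA, hd, hc]

theorem stepA_true_raise (c : Char) (rest ev out) (hd : ¬ pvIsDigit c) (h0 : ev ≠ [])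
    (hb : pvVal ev > 255 ∨ pvVal ev < 0) :
    pvAuxA (c :: rest) true ev out = none := by
  simp [pvAuxA, hd, h0, hb]

theorem stepA_true_chr_karat (rest ev out) (h0 : ev ≠ [])
    (h5 : ¬ (pvVal ev > 255 ∨ pvVal ev < 0)) :
    pvAuxA ('^' :: rest) true ev out =
      pvAuxA rest true [] (out ++ [Char.ofNat (pvVal ev).toNat]) := by
  simp [pvAuxA, pvIsDigit, h0, h5]

theorem stepA_true_chr_other (c : Char) (rest ev out) (hd : ¬ pvIsDigit c) (h0 : ev ≠ [])
    (h5 : ¬ (pvVal ev > 255 ∨ pvVal ev < 0)) (hc : c ≠ '^') :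
    pvAuxA (c :: rest) true ev out =
      pvAuxA rest false ev (out ++ [Char.ofNat (pvVal ev).toNat] ++ [c]) := by
  simp [pvAuxA, hd, h0, h5, hc]

theorem stepB_other (c : Char) (rest) (hc : c ≠ '^') :
    pvAuxB (c :: rest) = (pvAuxB rest).map (fun r => c :: r) := by
  simp [pvAuxB, hc]

-- the main simulation: A's two states against B
theorem pvAuxA_eq_B : ∀ (l : List Char),
    (∀ ev out, pvAuxA l false ev out = (pvAuxB l).map (fun r => out ++ r)) ∧
    (∀ ev out, (∀ c ∈ ev, pvIsDigit c) →
      pvAuxA l true ev out = (pvAuxBEsc ev l).map (fun r => out ++ r)) := by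
  intro l
  induction l with
  | nil =>
    constructor
    · intro ev out; simp [pvAuxA, pvAuxB]
    · intro ev out _; simp [pvAuxA, pvAuxBEsc]
  | cons c rest ih =>
    obtain ⟨ihF, ihT⟩ := ih
    constructor
    · -- esc = false
      intro ev out
      by_cases hc : c = '^'
      · subst hc
        rw [stepA_false_karat, pvAuxB_karat]
        exact ihT [] out (by simp)
      · rw [stepA_false_other c rest ev out hc, stepB_other c rest hc, ihF]
        cases pvAuxB rest <;> simp
    · -- esc = true
      intro ev out hev
      by_cases hd : pvIsDigit c
      · -- digit: keep collecting
        have hall : ∀ d ∈ ev ++ [c], pvIsDigit d := by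
          intro d hdm
          rcases List.mem_append.mp hdm with h | h
          · exact hev d h
          · simp at h; subst h; exact hd
        rw [stepA_true_digit c rest ev out hd, ihT (ev ++ [c]) out hall]
        have heq : pvAuxBEsc ev (c :: rest) = pvAuxBEsc (ev ++ [c]) rest := by
          simp [pvAuxBEsc, List.dropWhile_cons, List.takeWhile_cons, hd, List.append_assoc]
        rw [heq]
      · -- non-digit: flush, then reprocess c
        have hdw : (c :: rest).dropWhile pvIsDigit = c :: rest := by
          simp [List.dropWhile_cons, hd]
        have htw : (c :: rest).takeWhile pvIsDigit = [] := by
          simp [List.takeWhile_cons, hd]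
        have hesc : pvAuxBEsc ev (c :: rest) =
            (pvFlush ev).bind (fun f => (pvAuxB (c :: rest)).map (fun r => f ++ r)) := by
          simp [pvAuxBEsc, hdw, htw]
        rw [hesc]
        by_cases hev0 : ev = []
        · subst hev0
          have hfl : pvFlush [] = some ['^'] := by simp [pvFlush]
          rw [hfl, Option.bind_some]
          by_cases hc : c = '^'
          · subst hc
            rw [stepA_true_empty_karat, ihT [] (out ++ ['^']) (by simp), pvAuxB_karat]
            cases pvAuxBEsc [] rest <;> simp
          · rw [stepA_true_empty_other c rest out hd hc, ihF, stepB_other c rest hc]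
            cases pvAuxB rest <;> simp
        · have hnn : 0 ≤ pvVal ev := pvVal_nonneg ev hev
          by_cases hbig : pvVal ev > 255
          · rw [stepA_true_raise c rest ev out hd hev0 (Or.inl hbig)]
            simp [pvFlush, hev0, hbig]
          · have h5 : ¬ (pvVal ev > 255 ∨ pvVal ev < 0) := by omega
            have hfl : pvFlush ev = some [Char.ofNat (pvVal ev).toNat] := by
              simp [pvFlush, hev0, h5]
            rw [hfl, Option.bind_some]
            by_cases hc : c = '^'
            · subst hc
              rw [stepA_true_chr_karat rest ev out hev0 h5,
                  ihT [] (out ++ [Char.ofNat (pvVal ev).toNat]) (by simp), pvAuxB_karat]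
              cases pvAuxBEsc [] rest <;> simp
            · rw [stepA_true_chr_other c rest ev out hd hev0 h5 hc, ihF,
                  stepB_other c rest hc]
              cases pvAuxB rest <;> simp

-- ===== VERDICT (by name: the statement is the Claim_ definition above) =====
theorem escape_string_legacy_spec : Claim_equal_escape_string_legacy := by
  intro s _ _
  unfold Spec_escape_string_legacy escape_string_legacy escape_string_legacy_alt
  rw [(pvAuxA_eq_B s.toList).1 [] []]
  cases pvAuxB s.toList <;> simp
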